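-- pv_equiv track=rewrite | github.com/zorins376-hub/music-bot | recommender/profile_updater.py | _infer_vibe
-- ===== SOURCE A (Python) =====
-- def _infer_vibe(avg_bpm: int | None, genres: list[str]) -> str | None:
--     """Infer preferred vibe from BPM and genres.
--
--     Vibes:
--     - "chill": low BPM or ambient/lofi genres
--     - "energetic": high BPM or electronic/dance genres
--     - "deep": medium BPM with techno/house
--     - "intense": very high BPM or metal/hardcore
--     - "mellow": medium-low BPM, indie/acoustic
--     """
--     if not avg_bpm and not genres:
--         return None
--
--     # Genre-based inference
--     genre_set = set(g.lower() for g in (genres or []))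
--
--     chill_genres = {"ambient", "lofi", "chillout", "downtempo", "lo-fi", "jazz", "classical"}
--     energy_genres = {"edm", "electronic", "dance", "trance", "dnb", "drum and bass"}
--     deep_genres = {"techno", "house", "deep house", "tech house", "minimal"}
--     intense_genres = {"metal", "hardcore", "hardstyle", "gabber", "industrial"}
--
--     if genre_set & chill_genres:
--         return "chill"
--     if genre_set & intense_genres:
--         return "intense"
--     if genre_set & deep_genres:
--         return "deep"
--     if genre_set & energy_genres:
--         return "energetic"
--
--     # BPM-based fallback
--     if avg_bpm:
--         if avg_bpm < 90:
--             return "chill"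
--         elif avg_bpm < 110:
--             return "mellow"
--         elif avg_bpm < 130:
--             return "deep"
--         elif avg_bpm < 150:
--             return "energetic"
--         else:
--             return "intense"
--
--     return None
-- ===== SOURCE B (Python) =====
-- _GENRE_RANK = {
--     "ambient": (0, "chill"), "lofi": (0, "chill"), "chillout": (0, "chill"),
--     "downtempo": (0, "chill"), "lo-fi": (0, "chill"), "jazz": (0, "chill"),
--     "classical": (0, "chill"),
--     "metal": (1, "intense"), "hardcore": (1, "intense"), "hardstyle": (1, "intense"),
--     "gabber": (1, "intense"), "industrial": (1, "intense"),
--     "techno": (2, "deep"), "house": (2, "deep"), "deep house": (2, "deep"),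
--     "tech house": (2, "deep"), "minimal": (2, "deep"),
--     "edm": (3, "energetic"), "electronic": (3, "energetic"), "dance": (3, "energetic"),
--     "trance": (3, "energetic"), "dnb": (3, "energetic"), "drum and bass": (3, "energetic"),
-- }
--
--
-- def _infer_vibe(avg_bpm, genres):
--     if not avg_bpm and not genres:
--         return None
--     best = None
--     for g in genres:
--         hit = _GENRE_RANK.get(g.lower())
--         if hit is not None and (best is None or hit[0] < best[0]):
--             best = hit
--     if best is not None:
--         return best[1]
--     if avg_bpm:
--         if avg_bpm < 90:
--             return "chill"
--         elif avg_bpm < 110: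
--             return "mellow"
--         elif avg_bpm < 130:
--             return "deep"
--         elif avg_bpm < 150:
--             return "energetic"
--         return "intense"
--     return None
-- ===== Notes on version B (the rewrite author's own statement) =====
-- stated objective: idiomatic
-- what changed: Replaced the four set-intersection tests over a dedup'd genre set with one inverted dict mapping each genre to a (priority, label) pair and a single scan over genres keeping the minimum-priority hit; BPM fallback unchanged.
import Mathlib
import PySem

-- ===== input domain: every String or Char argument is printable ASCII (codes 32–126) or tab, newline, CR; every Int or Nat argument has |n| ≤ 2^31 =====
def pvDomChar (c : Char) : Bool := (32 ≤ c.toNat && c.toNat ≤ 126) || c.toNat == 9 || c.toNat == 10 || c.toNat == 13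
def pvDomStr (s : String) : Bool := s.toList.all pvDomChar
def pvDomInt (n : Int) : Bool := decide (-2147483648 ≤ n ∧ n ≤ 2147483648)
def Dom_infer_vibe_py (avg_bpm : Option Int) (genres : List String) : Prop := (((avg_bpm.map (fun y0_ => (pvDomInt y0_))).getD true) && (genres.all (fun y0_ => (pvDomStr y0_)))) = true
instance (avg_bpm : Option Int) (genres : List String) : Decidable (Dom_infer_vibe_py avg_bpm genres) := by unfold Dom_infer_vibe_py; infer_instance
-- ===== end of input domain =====

-- B replaces A's four set-intersection tests with one inverted (genre → priority, label) lookup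
-- table and a single minimum-priority scan over the genres (more idiomatic; same cost).

-- ===== PORT A =====
def chillKeys : List String := ["ambient", "lofi", "chillout", "downtempo", "lo-fi", "jazz", "classical"]
def energyKeys : List String := ["edm", "electronic", "dance", "trance", "dnb", "drum and bass"]
def deepKeys : List String := ["techno", "house", "deep house", "tech house", "minimal"]
def intenseKeys : List String := ["metal", "hardcore", "hardstyle", "gabber", "industrial"]
def chillGenres : PySem.Set String := PySem.Set.ofList chillKeys
def energyGenres : PySem.Set String := PySem.Set.ofList energyKeys
def deepGenres : PySem.Set String := PySem.Set.ofList deepKeys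
def intenseGenres : PySem.Set String := PySem.Set.ofList intenseKeys

def infer_vibe_py (avg_bpm : Option Int) (genres : List String) : Option String :=
  -- 'not avg_bpm': None or 0 is falsy
  let bpmTruthy : Bool := match avg_bpm with | none => false | some n => n != 0
  if !bpmTruthy && genres.isEmpty then none
  else
    let genre_set : PySem.Set String := PySem.Set.ofList (genres.map PySem.Str.lower)
    if !(PySem.Set.inter genre_set chillGenres).isEmpty then some "chill"
    else if !(PySem.Set.inter genre_set intenseGenres).isEmpty then some "intense"
    else if !(PySem.Set.inter genre_set deepGenres).isEmpty then some "deep"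
    else if !(PySem.Set.inter genre_set energyGenres).isEmpty then some "energetic"
    else if bpmTruthy then
      match avg_bpm with
      | some n =>
          if n < 90 then some "chill"
          else if n < 110 then some "mellow"
          else if n < 130 then some "deep"
          else if n < 150 then some "energetic"
          else some "intense"
      | none => none
    else none

-- ===== PORT B =====
def genreRank : PySem.Dict String (Int × String) := PySem.Dict.mk
  [("ambient", (0, "chill")), ("lofi", (0, "chill")), ("chillout", (0, "chill")),
   ("downtempo", (0, "chill")), ("lo-fi", (0, "chill")), ("jazz", (0, "chill")),
   ("classical", (0, "chill")),
   ("metal", (1, "intense")), ("hardcore", (1, "intense")), ("hardstyle", (1, "intense")),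
   ("gabber", (1, "intense")), ("industrial", (1, "intense")),
   ("techno", (2, "deep")), ("house", (2, "deep")), ("deep house", (2, "deep")),
   ("tech house", (2, "deep")), ("minimal", (2, "deep")),
   ("edm", (3, "energetic")), ("electronic", (3, "energetic")), ("dance", (3, "energetic")),
   ("trance", (3, "energetic")), ("dnb", (3, "energetic")), ("drum and bass", (3, "energetic"))]

def infer_vibe_py_alt (avg_bpm : Option Int) (genres : List String) : Option String :=
  let bpmTruthy : Bool := match avg_bpm with | none => false | some n => n != 0
  if !bpmTruthy && genres.isEmpty then none
  else
    let best : Option (Int × String) := genres.foldl (fun best g =>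
      match genreRank.get? (PySem.Str.lower g) with
      | some hit =>
          match best with
          | none => some hit
          | some b => if hit.1 < b.1 then some hit else some b
      | none => best) none
    match best with
    | some b => some b.2
    | none =>
      if bpmTruthy then
        match avg_bpm with
        | some n =>
            if n < 90 then some "chill"
            else if n < 110 then some "mellow"
            else if n < 130 then some "deep"
            else if n < 150 then some "energetic"
            else some "intense"
        | none => none
      else none

-- ===== PRECONDITION & SPEC =====
def Spec_infer_vibe_py (avg_bpm : Option Int) (genres : List String) (out : Option String) : Prop := out = infer_vibe_py_alt avg_bpm genres
instance (avg_bpm : Option Int) (genres : List String) (out : Option String) : Decidable (Spec_infer_vibe_py avg_bpm genres out) := by unfold Spec_infer_vibe_py; infer_instance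

-- ===== CLAIM (what is proved, stated in full; the proofs are below) =====
def Claim_equal_infer_vibe_py : Prop := ∀ (avg_bpm : Option Int) (genres : List String), Dom_infer_vibe_py avg_bpm genres → Spec_infer_vibe_py avg_bpm genres (infer_vibe_py avg_bpm genres)

-- ===== LEMMAS AND PROOFS =====

-- B's loop body, named for the proofs
def rankStep (best : Option (Int × String)) (g : String) : Option (Int × String) :=
  match genreRank.get? (PySem.Str.lower g) with
  | some hit =>
      match best with
      | none => some hit
      | some b => if hit.1 < b.1 then some hit else some b
  | none => best

-- merging two partial minima (left bias on ties)
def rmerge (a b : Option (Int × String)) : Option (Int × String) :=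
  match a, b with
  | none, b => b
  | some x, none => some x
  | some x, some y => if y.1 < x.1 then some y else some x

lemma rmerge_none_left (b : Option (Int × String)) : rmerge none b = b := by
  cases b <;> rfl

-- A's four checks, chained, as the specification of B's single scan
def chainSpec (gs : List String) : Option (Int × String) :=
  if ∃ g ∈ gs, PySem.Str.lower g ∈ chillGenres then some (0, "chill")
  else if ∃ g ∈ gs, PySem.Str.lower g ∈ intenseGenres then some (1, "intense")
  else if ∃ g ∈ gs, PySem.Str.lower g ∈ deepGenres then some (2, "deep")
  else if ∃ g ∈ gs, PySem.Str.lower g ∈ energyGenres then some (3, "energetic")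
  else none

-- first-match lookup in a block of keys sharing one value
lemma get?_block (keys : List String) (v : Int × String)
    (rest : List (String × (Int × String))) (s : String) :
    (PySem.Dict.mk (keys.map (fun k => (k, v)) ++ rest)).get? s =
      if s ∈ keys then some v else (PySem.Dict.mk rest).get? s := by
  induction keys with
  | nil => simp
  | cons k ks ih =>
      simp only [List.map_cons, List.cons_append, PySem.Dict.get?_mk_cons, ih]
      by_cases h : k = s
      · subst h; simp
      · have : (k == s) = false := by simp [h]
        simp [this, Ne.symm h]

-- the inverted table agrees with the four membership tests, in priority order
lemma lookup_cases (s : String) :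
    genreRank.get? s =
      (if s ∈ chillGenres then some ((0 : Int), "chill")
       else if s ∈ intenseGenres then some ((1 : Int), "intense")
       else if s ∈ deepGenres then some ((2 : Int), "deep")
       else if s ∈ energyGenres then some ((3 : Int), "energetic")
       else none) := by
  rw [show genreRank = PySem.Dict.mk
      (chillKeys.map (fun k => (k, ((0 : Int), "chill"))) ++
       (intenseKeys.map (fun k => (k, ((1 : Int), "intense"))) ++
        (deepKeys.map (fun k => (k, ((2 : Int), "deep"))) ++
         (energyKeys.map (fun k => (k, ((3 : Int), "energetic"))) ++ [])))) from rfl]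
  rw [get?_block, get?_block, get?_block, get?_block]
  simp only [chillGenres, intenseGenres, deepGenres, energyGenres, PySem.Set.mem_ofList]
  rfl

lemma rmerge_assoc (a b c : Option (Int × String)) :
    rmerge (rmerge a b) c = rmerge a (rmerge b c) := by
  rcases a with _ | x
  · rw [rmerge_none_left, rmerge_none_left]
  rcases b with _ | y
  · cases c <;> rfl
  rcases c with _ | z
  · simp only [rmerge]; split_ifs <;> rfl
  simp only [rmerge]
  split_ifs <;> simp only [rmerge] <;> split_ifs <;> first | rfl | omega

lemma fold_acc (gs : List String) (acc : Option (Int × String)) :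
    gs.foldl rankStep acc = rmerge acc (gs.foldl rankStep none) := by
  induction gs generalizing acc with
  | nil => cases acc <;> simp [rmerge]
  | cons g gs ih =>
      have hstep : ∀ a, rankStep a g = rmerge a (genreRank.get? (PySem.Str.lower g)) := by
        intro a
        unfold rankStep
        cases genreRank.get? (PySem.Str.lower g) <;> cases a <;> simp [rmerge]
      simp only [List.foldl_cons]
      rw [ih, ih (rankStep none g), hstep, hstep, rmerge_none_left, ← rmerge_assoc]

lemma rmerge_chain0 (gs : List String) :
    rmerge (some ((0 : Int), "chill")) (chainSpec gs) = some ((0 : Int), "chill") := by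
  unfold chainSpec; split_ifs <;> simp [rmerge]

lemma rmerge_chain1 (gs : List String) :
    rmerge (some ((1 : Int), "intense")) (chainSpec gs) =
      (if ∃ g ∈ gs, PySem.Str.lower g ∈ chillGenres then some ((0 : Int), "chill")
       else some ((1 : Int), "intense")) := by
  unfold chainSpec; split_ifs <;> simp [rmerge]

lemma rmerge_chain2 (gs : List String) :
    rmerge (some ((2 : Int), "deep")) (chainSpec gs) =
      (if ∃ g ∈ gs, PySem.Str.lower g ∈ chillGenres then some ((0 : Int), "chill")
       else if ∃ g ∈ gs, PySem.Str.lower g ∈ intenseGenres then some ((1 : Int), "intense")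
       else some ((2 : Int), "deep")) := by
  unfold chainSpec; split_ifs <;> simp [rmerge]

lemma rmerge_chain3 (gs : List String) :
    rmerge (some ((3 : Int), "energetic")) (chainSpec gs) =
      (if ∃ g ∈ gs, PySem.Str.lower g ∈ chillGenres then some ((0 : Int), "chill")
       else if ∃ g ∈ gs, PySem.Str.lower g ∈ intenseGenres then some ((1 : Int), "intense")
       else if ∃ g ∈ gs, PySem.Str.lower g ∈ deepGenres then some ((2 : Int), "deep")
       else some ((3 : Int), "energetic")) := by
  unfold chainSpec; split_ifs <;> simp [rmerge]

lemma fold_eq_chainSpec (gs : List String) :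
    gs.foldl rankStep none = chainSpec gs := by
  induction gs with
  | nil => simp [chainSpec]
  | cons g gs ih =>
      simp only [List.foldl_cons]
      rw [fold_acc, ih]
      have hhd : rankStep none g = genreRank.get? (PySem.Str.lower g) := by
        unfold rankStep
        cases genreRank.get? (PySem.Str.lower g) <;> rfl
      rw [hhd, lookup_cases]
      by_cases h1 : PySem.Str.lower g ∈ chillGenres
      · have hx : ∃ x ∈ g :: gs, PySem.Str.lower x ∈ chillGenres :=
          ⟨g, List.mem_cons_self, h1⟩
        rw [if_pos h1, rmerge_chain0, chainSpec, if_pos hx]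
      rw [if_neg h1]
      by_cases h2 : PySem.Str.lower g ∈ intenseGenres
      · rw [if_pos h2, rmerge_chain1]
        simp only [chainSpec, List.exists_mem_cons_iff]
        simp [h1, h2]
      rw [if_neg h2]
      by_cases h3 : PySem.Str.lower g ∈ deepGenres
      · rw [if_pos h3, rmerge_chain2]
        simp only [chainSpec, List.exists_mem_cons_iff]
        simp [h1, h2, h3]
      rw [if_neg h3]
      by_cases h4 : PySem.Str.lower g ∈ energyGenres
      · rw [if_pos h4, rmerge_chain3]
        simp only [chainSpec, List.exists_mem_cons_iff]
        simp [h1, h2, h3, h4]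
      rw [if_neg h4, rmerge_none_left]
      simp only [chainSpec, List.exists_mem_cons_iff]
      simp [h1, h2, h3, h4]

-- A's set-intersection test holds iff some raw genre lowers into the target set
lemma inter_test (gs : List String) (t : PySem.Set String) :
    ((!(PySem.Set.inter (PySem.Set.ofList (gs.map PySem.Str.lower)) t).isEmpty) = true) ↔
      ∃ g ∈ gs, PySem.Str.lower g ∈ t := by
  rw [Bool.not_eq_eq_eq_not, Bool.not_true, List.isEmpty_eq_false_iff]
  constructor
  · intro h
    obtain ⟨y, hy⟩ := List.exists_mem_of_ne_nil _ h
    rw [PySem.Set.mem_inter, PySem.Set.mem_ofList, List.mem_map] at hy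
    obtain ⟨⟨g, hg, rfl⟩, ht⟩ := hy
    exact ⟨g, hg, ht⟩
  · rintro ⟨g, hg, ht⟩
    refine List.ne_nil_of_mem (a := PySem.Str.lower g) ?_
    rw [PySem.Set.mem_inter, PySem.Set.mem_ofList, List.mem_map]
    exact ⟨⟨g, hg, rfl⟩, ht⟩

-- A's answer chain is B's projection of the minimum-priority hit
lemma tail_eq (gs : List String) (bres : Option String) :
    (if ∃ g ∈ gs, PySem.Str.lower g ∈ chillGenres then some "chill"
     else if ∃ g ∈ gs, PySem.Str.lower g ∈ intenseGenres then some "intense"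
     else if ∃ g ∈ gs, PySem.Str.lower g ∈ deepGenres then some "deep"
     else if ∃ g ∈ gs, PySem.Str.lower g ∈ energyGenres then some "energetic"
     else bres) =
      (match chainSpec gs with
       | some b => some b.2
       | none => bres) := by
  unfold chainSpec; split_ifs <;> rfl

-- ===== VERDICT (by name: the statement is the Claim_ definition above) =====
theorem infer_vibe_py_spec : Claim_equal_infer_vibe_py := by
  intro avg_bpm genres _
  show infer_vibe_py avg_bpm genres = infer_vibe_py_alt avg_bpm genres
  unfold infer_vibe_py infer_vibe_py_alt
  simp only [show (fun (best : Option (Int × String)) (g : String) =>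
      match genreRank.get? (PySem.Str.lower g) with
      | some hit => match best with
          | none => some hit
          | some b => if hit.1 < b.1 then some hit else some b
      | none => best) = rankStep from rfl]
  rw [fold_eq_chainSpec]
  refine if_congr Iff.rfl rfl ?_
  simp only [inter_test]
  exact tail_eq genres _
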